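-- pv_equiv track=rewrite | github.com/zhenfelix/OnlineJudgeCodings | LeetCode/1764. Form Array by Concatenating Subarrays of Another Array/solution.py | canChoose
-- ===== SOURCE A (Python) =====
-- from typing import List
--
-- def canChoose(groups: List[List[int]], nums: List[int]) -> bool:
--     def find(pattern, idx):
--         m = len(pattern)
--         while idx+m <= len(nums) and pattern != nums[idx:idx+m]:
--             idx += 1
--         return idx+m if idx+m <= len(nums) else -1
--
--     cur = 0
--     for g in groups:
--         cur = find(g,cur)
--         if cur < 0:
--             return False
--     return True
-- ===== SOURCE B (Python) =====
-- def canChoose(groups, nums):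
--     # Walk the suffixes of nums, testing each group as a prefix; the remaining
--     # suffix is kept REVERSED so that dropping its first element is an O(1) pop.
--     rev = nums[::-1]
--     for g in groups:
--         rg = g[::-1]
--         while rev[len(rev) - len(rg):] != rg:
--             if not rev:
--                 return False
--             rev.pop()
--         del rev[len(rev) - len(rg):]
--     return True
-- ===== Notes on version B (the rewrite author's own statement) =====
-- stated objective: alternative
-- what changed: B replaces A's integer cursor, slice windows and the -1 sentinel by walking the suffixes of nums (kept reversed so dropping one element is an O(1) pop), threading the remaining suffix as an Option instead of an index.
import Mathlib
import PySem

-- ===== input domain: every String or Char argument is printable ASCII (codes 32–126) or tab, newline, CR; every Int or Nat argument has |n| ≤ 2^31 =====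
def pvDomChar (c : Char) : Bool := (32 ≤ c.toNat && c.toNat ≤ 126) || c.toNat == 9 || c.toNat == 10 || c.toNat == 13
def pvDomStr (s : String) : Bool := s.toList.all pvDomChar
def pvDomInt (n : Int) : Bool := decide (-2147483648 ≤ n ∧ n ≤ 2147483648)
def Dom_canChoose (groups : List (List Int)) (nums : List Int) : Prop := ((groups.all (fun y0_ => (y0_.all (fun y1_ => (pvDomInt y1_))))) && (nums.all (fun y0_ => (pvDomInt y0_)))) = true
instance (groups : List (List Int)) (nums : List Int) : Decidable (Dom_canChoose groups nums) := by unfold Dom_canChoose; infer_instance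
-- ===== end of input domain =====

-- B replaces A's integer cursor, slice windows and -1 sentinel by walking the suffixes of
-- nums (kept reversed so dropping an element is an O(1) pop), returning the remaining
-- suffix as an Option (objective: alternative decomposition; same asymptotic cost).

-- ===== PORT A =====
-- the inner `find`: while idx+m <= len(nums) and pattern != nums[idx:idx+m]: idx += 1
def findA (nums pattern : List Int) (idx : Int) : Int :=
  if idx + pattern.length ≤ (nums.length : Int) ∧
     pattern ≠ PySem.List.slice nums (some idx) (some (idx + pattern.length)) then
    findA nums pattern (idx + 1)
  else if idx + pattern.length ≤ (nums.length : Int) then idx + pattern.length else -1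
termination_by ((nums.length : Int) + 1 - idx).toNat
decreasing_by omega

-- the for-loop over groups with early return False
def canChooseLoopA (nums : List Int) (groups : List (List Int)) (cur : Int) : Bool :=
  match groups with
  | [] => true
  | g :: gs =>
    let cur' := findA nums g cur
    if cur' < 0 then false else canChooseLoopA nums gs cur'

def canChoose (groups : List (List Int)) (nums : List Int) : Bool :=
  canChooseLoopA nums groups 0

-- ===== PORT B =====
-- Source B's inner while-loop: rev is the remaining (reversed) suffix, rg the reversed group;
-- while rev[len(rev)-len(rg):] != rg: pop; on success `del rev[len(rev)-len(rg):]`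
def afterFirstMatchRev (rg rev : List Int) : Option (List Int) :=
  if PySem.List.slice rev (some ((rev.length : Int) - (rg.length : Int))) none = rg then
    some (PySem.List.slice rev none (some ((rev.length : Int) - (rg.length : Int))))
  else if h : rev = [] then none
  else afterFirstMatchRev rg rev.dropLast
termination_by rev.length
decreasing_by
  have hpos : 0 < rev.length := List.length_pos_iff.mpr h
  simp [List.length_dropLast]
  omega

-- Source B's for-loop over groups threading the reversed suffix
def canChooseAltLoop (groups : List (List Int)) (rev : List Int) : Bool :=
  match groups with
  | [] => true
  | g :: gs =>
    match afterFirstMatchRev g.reverse rev with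
    | none => false
    | some r => canChooseAltLoop gs r

def canChoose_alt (groups : List (List Int)) (nums : List Int) : Bool :=
  canChooseAltLoop groups nums.reverse

-- ===== PRECONDITION & SPEC =====
def Spec_canChoose (groups : List (List Int)) (nums : List Int) (out : Bool) : Prop := out = canChoose_alt groups nums
instance (groups : List (List Int)) (nums : List Int) (out : Bool) : Decidable (Spec_canChoose groups nums out) := by unfold Spec_canChoose; infer_instance

-- ===== CLAIM (what is proved, stated in full; the proofs are below) =====
def Claim_equal_canChoose : Prop := ∀ (groups : List (List Int)) (nums : List Int), Dom_canChoose groups nums → Spec_canChoose groups nums (canChoose groups nums)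

-- ===== LEMMAS AND PROOFS =====

-- proof-side bridge: the same suffix walk in plain (unreversed) form
def afterFirstMatch (g xs : List Int) : Option (List Int) :=
  if xs.take g.length = g then some (xs.drop g.length)
  else
    match xs with
    | [] => none
    | _ :: t => afterFirstMatch g t

def canChoosePlainLoop (groups : List (List Int)) (rest : List Int) : Bool :=
  match groups with
  | [] => true
  | g :: gs =>
    match afterFirstMatch g rest with
    | none => false
    | some r => canChoosePlainLoop gs r

-- plain walk returns none on a suffix shorter than the pattern
theorem afterFirstMatch_short (g xs : List Int) (h : xs.length < g.length) :
    afterFirstMatch g xs = none := by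
  induction xs with
  | nil =>
    have hne : List.take g.length ([] : List Int) ≠ g := by
      intro he
      have := congrArg List.length he
      rw [List.length_take] at this
      simp at this
      omega
    rw [afterFirstMatch, if_neg hne]
  | cons x t ih =>
    have hne : (x :: t).take g.length ≠ g := by
      intro he
      have := congrArg List.length he
      rw [List.length_take] at this
      simp at h this
      omega
    rw [afterFirstMatch, if_neg hne]
    exact ih (by simp at h ⊢; omega)

-- A's find (from index idx) agrees with the plain suffix walk on nums.drop idx
theorem findA_eq_afterFirstMatch (nums g : List Int) (idx : Int)
    (h0 : 0 ≤ idx) (hle : idx ≤ (nums.length : Int)) :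
    (findA nums g idx = -1 ∧ afterFirstMatch g (nums.drop idx.toNat) = none) ∨
    (0 ≤ findA nums g idx ∧ findA nums g idx ≤ (nums.length : Int) ∧
      afterFirstMatch g (nums.drop idx.toNat) = some (nums.drop (findA nums g idx).toNat)) := by
  induction idx using findA.induct (nums := nums) (pattern := g) with
  | case1 idx hcond ih =>
    obtain ⟨hc1, hc2⟩ := hcond
    have hm : 0 < g.length := by
      rcases Nat.eq_zero_or_pos g.length with hz | hm
      · exfalso
        apply hc2
        have hg : g = [] := List.eq_nil_of_length_eq_zero hz
        rw [hg, PySem.List.slice_toNat nums h0 (by simpa [hg] using h0)]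
        have h00 : (idx + ((List.length ([] : List Int)) : Int)).toNat - idx.toNat = 0 := by
          simp
        rw [h00, List.take_zero]
      · exact hm
    have hidxlt : idx < (nums.length : Int) := by omega
    have hntlt : idx.toNat < nums.length := by omega
    have hslice : PySem.List.slice nums (some idx) (some (idx + g.length)) =
        List.take g.length (List.drop idx.toNat nums) := by
      rw [PySem.List.slice_toNat nums h0 (by omega)]
      congr 1
      omega
    have hdrop : nums.drop idx.toNat = nums[idx.toNat] :: nums.drop (idx.toNat + 1) :=
      List.drop_eq_getElem_cons hntlt
    have hAF : afterFirstMatch g (nums.drop idx.toNat)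
        = afterFirstMatch g (nums.drop (idx + 1).toNat) := by
      rw [hdrop, afterFirstMatch]
      have hne : (nums[idx.toNat] :: nums.drop (idx.toNat + 1)).take g.length ≠ g := by
        intro he
        apply hc2
        rw [hslice, hdrop]
        exact he.symm
      rw [if_neg hne]
      have h1 : (idx + 1).toNat = idx.toNat + 1 := by omega
      simp [h1]
    rw [findA, if_pos ⟨hc1, hc2⟩, hAF]
    exact ih (by omega) (by omega)
  | case2 idx hcond hin =>
    have hg : g = PySem.List.slice nums (some idx) (some (idx + g.length)) := by
      by_contra hne
      exact hcond ⟨hin, hne⟩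
    have hslice : PySem.List.slice nums (some idx) (some (idx + g.length)) =
        List.take g.length (List.drop idx.toNat nums) := by
      rw [PySem.List.slice_toNat nums h0 (by omega)]
      congr 1
      omega
    rw [findA, if_neg hcond, if_pos hin]
    right
    refine ⟨by omega, by omega, ?_⟩
    rw [afterFirstMatch.eq_def, if_pos (by rw [← hslice]; exact hg.symm)]
    have hd : List.drop g.length (List.drop idx.toNat nums)
        = List.drop ((idx + (g.length : Int)).toNat) nums := by
      rw [List.drop_drop]
      congr 1
      omega
    rw [hd]
  | case3 idx hcond hout =>
    rw [findA, if_neg hcond, if_neg hout]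
    exact Or.inl ⟨rfl, afterFirstMatch_short g _ (by simp; omega)⟩

-- A's loop agrees with the plain suffix loop
theorem loops_eq (groups : List (List Int)) (nums : List Int) (cur : Int)
    (h0 : 0 ≤ cur) (hle : cur ≤ (nums.length : Int)) :
    canChooseLoopA nums groups cur = canChoosePlainLoop groups (nums.drop cur.toNat) := by
  induction groups generalizing cur with
  | nil => rfl
  | cons g gs ih =>
    rcases findA_eq_afterFirstMatch nums g cur h0 hle with ⟨hA, hB⟩ | ⟨h1, h2, hB⟩
    · simp [canChooseLoopA, canChoosePlainLoop, hA, hB]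
    · have hge : ¬ findA nums g cur < 0 := by omega
      simp [canChooseLoopA, canChoosePlainLoop, hB, hge]
      exact ih _ h1 h2

-- the reversed prefix test of B is the plain prefix test
theorem revCond_iff (g rest : List Int) :
    PySem.List.slice rest.reverse
        (some ((rest.reverse.length : Int) - (g.reverse.length : Int))) none = g.reverse
      ↔ rest.take g.length = g := by
  by_cases hm : g.length ≤ rest.length
  · have h0 : (0 : Int) ≤ (rest.reverse.length : Int) - (g.reverse.length : Int) := by
      simp
      omega
    rw [PySem.List.slice_from rest.reverse h0]
    have hk : ((rest.reverse.length : Int) - (g.reverse.length : Int)).toNat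
        = rest.length - g.length := by
      simp only [List.length_reverse]
      omega
    rw [hk, List.drop_reverse]
    have : rest.length - (rest.length - g.length) = g.length := by omega
    rw [this, List.reverse_inj]
  · constructor
    · intro he
      exfalso
      have := congrArg List.length he
      rw [PySem.List.slice_some_none, List.length_drop] at this
      simp at this
      omega
    · intro he
      exfalso
      have := congrArg List.length he
      rw [List.length_take] at this
      simp at this
      omega

-- B's reversed walk is the plain walk, up to reversing the returned suffix
theorem afterFirstMatchRev_eq (g rest : List Int) :
    afterFirstMatchRev g.reverse rest.reverse
      = Option.map List.reverse (afterFirstMatch g rest) := by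
  induction rest with
  | nil =>
    rw [afterFirstMatchRev, afterFirstMatch]
    by_cases hc : List.take g.length ([] : List Int) = g
    · rw [if_pos ((revCond_iff g []).mpr hc), if_pos hc]
      simp [PySem.List.slice]
    · rw [if_neg (fun h => hc ((revCond_iff g []).mp h)), if_neg hc]
      simp
  | cons x t ih =>
    rw [afterFirstMatchRev, afterFirstMatch]
    by_cases hc : (x :: t).take g.length = g
    · rw [if_pos ((revCond_iff g (x :: t)).mpr hc), if_pos hc]
      have hm : g.length ≤ (x :: t).length := by
        have := congrArg List.length hc
        rw [List.length_take] at this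
        omega
      have h0 : (0 : Int) ≤ ((x :: t).reverse.length : Int) - (g.reverse.length : Int) := by
        simp only [List.length_reverse]
        omega
      rw [PySem.List.slice_to (x :: t).reverse h0]
      have hk : (((x :: t).reverse.length : Int) - (g.reverse.length : Int)).toNat
          = (x :: t).length - g.length := by
        simp only [List.length_reverse]
        omega
      rw [hk, List.take_reverse]
      have : (x :: t).length - ((x :: t).length - g.length) = g.length := by omega
      rw [this]
      rfl
    · rw [if_neg (fun h => hc ((revCond_iff g (x :: t)).mp h)), if_neg hc]
      have hne : (x :: t).reverse ≠ [] := by simp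
      rw [dif_neg hne]
      have hdl : (x :: t).reverse.dropLast = t.reverse := by simp
      rw [hdl, ih]
-- B's loop on the reversed list is the plain loop
theorem altLoop_eq (groups : List (List Int)) (rest : List Int) :
    canChooseAltLoop groups rest.reverse = canChoosePlainLoop groups rest := by
  induction groups generalizing rest with
  | nil => rfl
  | cons g gs ih =>
    rw [canChooseAltLoop, canChoosePlainLoop, afterFirstMatchRev_eq]
    cases afterFirstMatch g rest with
    | none => rfl
    | some r => exact ih r

-- ===== VERDICT (by name: the statement is the Claim_ definition above) =====
theorem canChoose_spec : Claim_equal_canChoose := by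
  intro groups nums _
  unfold Spec_canChoose canChoose canChoose_alt
  rw [altLoop_eq]
  simpa using loops_eq groups nums 0 (by omega) (by simp)
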